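-- pv_equiv track=rewrite | github.com/GianSz/Talleres | Taller 2/Ejercicio_7.py | returnNegativeValuesOrdered
-- ===== SOURCE A (Python) =====
-- def returnNegativeValuesOrdered(list):
--     finalList = []
--     for i in range(0, len(list)):
--         if(list[i]<0):
--             finalList.append(list[i])
--         else:
--             break
--     return finalList
-- ===== SOURCE B (Python) =====
-- def returnNegativeValuesOrdered(list):
--     cutoff = next((i for i, x in enumerate(list) if x >= 0), len(list))
--     return list[:cutoff]
-- ===== Notes on version B (the rewrite author's own statement) =====
-- stated objective: idiomatic
-- what changed: B locates the first non-negative element's index with next(enumerate(...)) and returns a single slice list[:cutoff] instead of A's index loop that appends element-by-element until a break.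
import Mathlib
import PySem

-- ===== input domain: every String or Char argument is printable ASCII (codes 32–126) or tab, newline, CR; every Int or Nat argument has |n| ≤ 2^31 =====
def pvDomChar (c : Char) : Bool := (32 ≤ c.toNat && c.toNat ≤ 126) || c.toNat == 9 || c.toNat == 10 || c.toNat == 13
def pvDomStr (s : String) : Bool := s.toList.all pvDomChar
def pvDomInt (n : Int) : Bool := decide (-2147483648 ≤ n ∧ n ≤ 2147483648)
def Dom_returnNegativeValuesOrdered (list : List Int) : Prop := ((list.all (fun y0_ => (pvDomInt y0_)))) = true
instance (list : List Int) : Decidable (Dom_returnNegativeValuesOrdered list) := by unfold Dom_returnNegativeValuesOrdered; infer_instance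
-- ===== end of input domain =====

-- B: find the index of the first non-negative element, then return a single slice; idiomatic decomposition, same cost.
-- ===== PORT A =====
-- A's for-loop over indices with append-until-break, transcribed as structural recursion over the list:
-- each step checks list[i] < 0, appends it and continues, or breaks returning the accumulated prefix.
def pvALoop : List Int → List Int
  | [] => []
  | x :: xs => if x < 0 then x :: pvALoop xs else []

def returnNegativeValuesOrdered (list : List Int) : List Int := pvALoop list

-- ===== PORT B =====
-- cutoff = next((i for i, x in enumerate(list) if x >= 0), len(list)); return list[:cutoff].
-- list[:cutoff] with 0 ≤ cutoff ≤ len list is exactly List.take cutoff.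
def returnNegativeValuesOrdered_alt (list : List Int) : List Int :=
  let cutoff : Nat := (List.findIdx? (fun x => 0 ≤ x) list).getD list.length
  list.take cutoff

-- ===== PRECONDITION & SPEC =====
def Spec_returnNegativeValuesOrdered (list : List Int) (out : List Int) : Prop := out = returnNegativeValuesOrdered_alt list
instance (list : List Int) (out : List Int) : Decidable (Spec_returnNegativeValuesOrdered list out) := by unfold Spec_returnNegativeValuesOrdered; infer_instance

-- ===== CLAIM (what is proved, stated in full; the proofs are below) =====
def Claim_equal_returnNegativeValuesOrdered : Prop := ∀ (list : List Int), Dom_returnNegativeValuesOrdered list → Spec_returnNegativeValuesOrdered list (returnNegativeValuesOrdered list)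

-- ===== LEMMAS AND PROOFS =====

-- ===== VERDICT (by name: the statement is the Claim_ definition above) =====
theorem pvALoop_eq_alt (l : List Int) : pvALoop l = returnNegativeValuesOrdered_alt l := by
  induction l with
  | nil => rfl
  | cons x xs ih =>
    simp only [pvALoop, returnNegativeValuesOrdered_alt, List.findIdx?_cons] at *
    by_cases h : (0:Int) ≤ x
    · simp [h, not_lt.mpr h]
    · simp only [decide_eq_true_eq, if_neg h, not_le.mp h, if_pos]
      cases hf : List.findIdx? (fun x => 0 ≤ x) xs with
      | none => simp [hf] at ih ⊢; exact ih
      | some i => simp [hf] at ih ⊢; exact ih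

theorem returnNegativeValuesOrdered_spec : Claim_equal_returnNegativeValuesOrdered := by
  intro l _
  unfold Spec_returnNegativeValuesOrdered returnNegativeValuesOrdered
  exact pvALoop_eq_alt l
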